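-- pv_equiv track=rewrite | github.com/Horia242/RectanglesProblem | main.py | number_of_rectangles
-- ===== SOURCE A (Python) =====
-- def number_of_rectangles(list_of_pairs):
--     '''
--     Function that calculate the number of rectangles
--     :param list_of_pairs: for every y this list contains a list with all the pairs formed with coresponding x values
--     :return: no_of_rect : number of rectangles that can be created by those points
--     '''
--     no_of_rect = 0;
--     for i in range (len(list_of_pairs)-1):  # we go through all list of pairs except the last one
--         for j in list_of_pairs[i]:  # we go through every pair of the list
--             for k in range (i+1,len(list_of_pairs)): #we go through every list of pairs from i+1 to the last one and verify if we have a matching pair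
--                 if j in list_of_pairs[k]:
--                     no_of_rect+=1;
--     return no_of_rect
-- ===== SOURCE B (Python) =====
-- def number_of_rectangles(list_of_pairs):
--     # One backward pass: cnt[p] = number of already-seen (later) lists containing p.
--     cnt = {}
--     total = 0
--     for lst in reversed(list_of_pairs):
--         for p in lst:
--             total += cnt.get(p, 0)
--         for p in set(lst):
--             cnt[p] = cnt.get(p, 0) + 1
--     return total
-- ===== Notes on version B (the rewrite author's own statement) =====
-- stated objective: faster
-- what changed: Replaces A's nested index scans (for every pair of every list, re-scanning each later list with 'in') by a single backward pass that maintains a dict mapping each pair to the number of later lists containing it.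
import Mathlib
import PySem

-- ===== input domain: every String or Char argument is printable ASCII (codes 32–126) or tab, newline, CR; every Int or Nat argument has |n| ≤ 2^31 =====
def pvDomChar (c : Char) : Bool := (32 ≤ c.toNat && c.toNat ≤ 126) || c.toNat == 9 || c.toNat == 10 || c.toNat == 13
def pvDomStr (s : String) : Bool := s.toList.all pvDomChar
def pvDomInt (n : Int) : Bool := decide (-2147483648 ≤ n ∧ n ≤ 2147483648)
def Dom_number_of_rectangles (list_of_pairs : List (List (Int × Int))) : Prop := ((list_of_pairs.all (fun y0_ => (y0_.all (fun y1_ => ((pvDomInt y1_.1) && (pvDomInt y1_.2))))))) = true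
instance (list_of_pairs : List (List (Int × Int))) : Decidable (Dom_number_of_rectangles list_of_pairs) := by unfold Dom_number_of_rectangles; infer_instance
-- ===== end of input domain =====

-- B replaces A's nested rescans of later lists by one backward pass with a dict of per-pair
-- counts of later lists containing the pair; return value proved equal.

-- ===== PORT A =====
-- literal transliteration of A's triple index loop; the indices range produces are always
-- in bounds, so list_of_pairs[i] / [k] are ported with pyGetD (the default [] is never used)
def number_of_rectangles (list_of_pairs : List (List (Int × Int))) : Int :=
  (PySem.List.pyRange 0 ((list_of_pairs.length : Int) - 1)).foldl (fun acc i =>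
    (PySem.List.pyGetD list_of_pairs i []).foldl (fun acc j =>
      (PySem.List.pyRange (i + 1) (list_of_pairs.length : Int)).foldl (fun acc k =>
        if (PySem.List.pyGetD list_of_pairs k []).contains j then acc + 1 else acc) acc) acc) 0

-- ===== PORT B =====
-- one iteration of B's backward loop: add the cnt-lookups of the list's pairs to the
-- running total, then bump cnt on the list's distinct pairs (cnt[p] = cnt.get(p,0)+1)
def pvStep (st : PySem.Dict (Int × Int) Int × Int) (lst : List (Int × Int)) :
    PySem.Dict (Int × Int) Int × Int :=
  let t := lst.foldl (fun t p => t + st.1.getD p 0) st.2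
  let d := (PySem.Set.ofList lst).foldl (fun d x => d.modify x 0 (fun x => x + 1)) st.1
  (d, t)

def number_of_rectangles_alt (list_of_pairs : List (List (Int × Int))) : Int :=
  (list_of_pairs.reverse.foldl pvStep (PySem.Dict.empty, 0)).2

-- ===== PRECONDITION & SPEC =====
def Spec_number_of_rectangles (list_of_pairs : List (List (Int × Int))) (out : Int) : Prop := out = number_of_rectangles_alt list_of_pairs
instance (list_of_pairs : List (List (Int × Int))) (out : Int) : Decidable (Spec_number_of_rectangles list_of_pairs out) := by unfold Spec_number_of_rectangles; infer_instance

-- ===== CLAIM (what is proved, stated in full; the proofs are below) =====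
def Claim_equal_number_of_rectangles : Prop := ∀ (list_of_pairs : List (List (Int × Int))), Dom_number_of_rectangles list_of_pairs → Spec_number_of_rectangles list_of_pairs (number_of_rectangles list_of_pairs)

-- ===== LEMMAS AND PROOFS =====

-- number of lists in Ls containing the pair p
def pvCF (Ls : List (List (Int × Int))) (p : Int × Int) : Int :=
  (Ls.countP (fun l => l.contains p) : Int)

-- reference value: each pair of each list counts once per LATER list containing it
def pvS : List (List (Int × Int)) → Int
  | [] => 0
  | l :: rest => (l.map (fun p => pvCF rest p)).sum + pvS rest

lemma pvCF_cons (l : List (Int × Int)) (rest : List (List (Int × Int))) (p : Int × Int) :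
    pvCF (l :: rest) p = pvCF rest p + (if p ∈ l then 1 else 0) := by
  simp only [pvCF, List.countP_cons]
  by_cases hj : p ∈ l <;> simp [hj]

-- counting index matches over pyRange a len equals counting over the dropped suffix
lemma pvCount_range (L : List (List (Int × Int))) (j : Int × Int) :
    ∀ (a : Nat),
      ((PySem.List.pyRange (a : Int) (L.length : Int)).countP
          (fun k => (PySem.List.pyGetD L k []).contains j) : Int)
        = pvCF (L.drop a) j := by
  intro a
  by_cases h : a < L.length
  · induction hfuel : L.length - a generalizing a with
    | zero => omega
    | succ m ih =>
      rw [PySem.List.pyRange_one_cons (by exact_mod_cast h)]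
      have hget : PySem.List.pyGetD L (a : Int) [] = L[a] := by
        rw [PySem.List.pyGetD_natCast, List.getD_eq_getElem _ _ h]
      rw [List.countP_cons, List.drop_eq_getElem_cons h, hget, pvCF_cons]
      push_cast
      rw [show ((a : Int) + 1) = ((a + 1 : Nat) : Int) by push_cast; ring]
      by_cases h2 : a + 1 < L.length
      · rw [ih (a + 1) h2 (by omega)]
        by_cases hj : j ∈ L[a] <;> simp [hj]
      · have hnil : PySem.List.pyRange ((a + 1 : Nat) : Int) (L.length : Int) = [] := by
          apply List.eq_nil_iff_forall_not_mem.mpr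
          intro x hx
          rw [PySem.List.mem_pyRange_one] at hx
          omega
        have hdnil : L.drop (a + 1) = [] := List.drop_eq_nil_of_le (by omega)
        rw [hnil, hdnil]
        by_cases hj : j ∈ L[a] <;> simp [hj, pvCF]
  · have hnil : PySem.List.pyRange (a : Nat) (L.length : Int) = [] := by
      apply List.eq_nil_iff_forall_not_mem.mpr
      intro x hx
      rw [PySem.List.mem_pyRange_one] at hx
      omega
    have hdnil : L.drop a = [] := List.drop_eq_nil_of_le (by omega)
    simp [hnil, hdnil, pvCF]

-- one outer-loop body of A: the two inner loops add the later-list counts of L[k]'s pairs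
lemma pvBody (L : List (List (Int × Int))) (k : Nat) (acc : Int) :
    ((PySem.List.pyGetD L (k : Int) []).foldl (fun acc j =>
        (PySem.List.pyRange ((k : Int) + 1) (L.length : Int)).foldl (fun acc k' =>
          if (PySem.List.pyGetD L k' []).contains j then acc + 1 else acc) acc) acc)
      = acc + ((L.getD k []).map (fun j => pvCF (L.drop (k + 1)) j)).sum := by
  have hinner : ∀ (a : Int), ∀ j ∈ PySem.List.pyGetD L (k : Int) [],
      ((PySem.List.pyRange ((k : Int) + 1) (L.length : Int)).foldl (fun acc k' =>
        if (PySem.List.pyGetD L k' []).contains j then acc + 1 else acc) a)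
      = a + pvCF (L.drop (k + 1)) j := by
    intro a j _
    rw [PySem.List.foldl_ite_add_one
      (fun k' => (PySem.List.pyGetD L k' []).contains j = true)
      (PySem.List.pyRange ((k : Int) + 1) (L.length : Int)) a]
    congr 1
    rw [show ((k : Int) + 1) = ((k + 1 : Nat) : Int) by push_cast; ring]
    have hc := pvCount_range L j (k + 1)
    simpa using hc
  rw [PySem.List.foldl_congr_mem _ _ _ acc hinner,
      PySem.List.foldl_add, PySem.List.pyGetD_natCast]

-- A's outer loop over a list of Nat indices, as a sum
lemma pvOuter (L : List (List (Int × Int))) (ns : List Nat) :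
    ∀ (acc : Int),
      ns.foldl (fun (acc : Int) (k : Nat) =>
        ((PySem.List.pyGetD L (k : Int) []).foldl (fun acc j =>
          (PySem.List.pyRange ((k : Int) + 1) (L.length : Int)).foldl (fun acc k' =>
            if (PySem.List.pyGetD L k' []).contains j then acc + 1 else acc) acc) acc)) acc
      = acc + (ns.map (fun i => ((L.getD i []).map (fun j => pvCF (L.drop (i + 1)) j)).sum)).sum := by
  induction ns with
  | nil => simp
  | cons k ns ih =>
    intro acc
    rw [List.foldl_cons, ih, pvBody]
    simp [add_assoc]

-- A's value as a sum over Nat indices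
lemma pvA_eq_sum (L : List (List (Int × Int))) :
    number_of_rectangles L
      = ((List.range (L.length - 1)).map
          (fun i => ((L.getD i []).map (fun j => pvCF (L.drop (i + 1)) j)).sum)).sum := by
  unfold number_of_rectangles
  have hrange : PySem.List.pyRange 0 ((L.length : Int) - 1)
      = List.map (fun k : Nat => (k : Int)) (List.range (L.length - 1)) := by
    cases L with
    | nil => decide
    | cons l rest =>
      have h1 : ((l :: rest).length : Int) - 1 = ((rest.length : Nat) : Int) := by
        simp
      have h2 : (l :: rest).length - 1 = rest.length := by simp
      rw [h1, h2, PySem.List.pyRange_zero_natCast]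
  rw [hrange, List.foldl_map, pvOuter L (List.range (L.length - 1)) 0]
  ring

-- the index-sum form is the structural reference value
lemma pvSum_eq_S (L : List (List (Int × Int))) :
    ((List.range (L.length - 1)).map
        (fun i => ((L.getD i []).map (fun j => pvCF (L.drop (i + 1)) j)).sum)).sum
      = pvS L := by
  induction L with
  | nil => simp [pvS]
  | cons l rest ih =>
    cases rest with
    | nil => simp [pvS, pvCF]
    | cons r rs =>
      have hlen : (l :: r :: rs).length - 1 = rs.length + 1 := by simp
      rw [hlen, List.range_succ_eq_map]
      simp only [List.map_cons, List.map_map, List.sum_cons]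
      have hshift :
          ((List.range rs.length).map
            ((fun i => (((l :: r :: rs).getD i []).map
                (fun j => pvCF ((l :: r :: rs).drop (i + 1)) j)).sum) ∘ Nat.succ)).sum
          = ((List.range ((r :: rs).length - 1)).map
              (fun i => (((r :: rs).getD i []).map
                (fun j => pvCF ((r :: rs).drop (i + 1)) j)).sum)).sum := by
        have hlen2 : (r :: rs).length - 1 = rs.length := by simp
        rw [hlen2]
        apply congrArg
        apply List.map_congr_left
        intro k _
        simp [Nat.succ_eq_add_one]
      rw [hshift, ih]
      simp [pvS]

-- B's dict after the backward pass: getD p 0 counts the processed lists containing p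
lemma pvDict_inv (Ls : List (List (Int × Int))) (d : PySem.Dict (Int × Int) Int) (t : Int)
    (p : Int × Int) :
    ((Ls.reverse.foldl pvStep (d, t)).1).getD p 0 = d.getD p 0 + pvCF Ls p := by
  induction Ls generalizing t with
  | nil => simp [pvCF]
  | cons l rest ih =>
    rw [List.reverse_cons, List.foldl_append]
    simp only [List.foldl_cons, List.foldl_nil, pvStep]
    rw [PySem.Dict.getD_foldl_modify_add_one, ih, pvCF_cons]
    have hcnt : (PySem.Set.ofList l).count p = if p ∈ l then 1 else 0 := by
      rw [(PySem.Set.nodup_ofList l).count]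
      simp [PySem.Set.mem_ofList]
    rw [hcnt]
    by_cases hj : p ∈ l
    · simp [hj]
      ring
    · simp [hj]

-- B's running total accumulates the reference value
lemma pvTotal_inv (Ls : List (List (Int × Int))) (t : Int) :
    (Ls.reverse.foldl pvStep (PySem.Dict.empty, t)).2 = t + pvS Ls := by
  induction Ls generalizing t with
  | nil => simp [pvS]
  | cons l rest ih =>
    rw [List.reverse_cons, List.foldl_append]
    simp only [List.foldl_cons, List.foldl_nil, pvStep]
    rw [PySem.List.foldl_add, ih, pvS]
    have hmap : l.map (fun p => ((rest.reverse.foldl pvStep (PySem.Dict.empty, t)).1).getD p 0)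
        = l.map (fun p => pvCF rest p) := by
      apply List.map_congr_left
      intro p _
      rw [pvDict_inv]
      simp [PySem.Dict.getD, PySem.Dict.get?_empty]
    rw [hmap]
    ring

-- ===== VERDICT (by name: the statement is the Claim_ definition above) =====
theorem number_of_rectangles_spec : Claim_equal_number_of_rectangles := by
  intro L _
  unfold Spec_number_of_rectangles number_of_rectangles_alt
  rw [pvA_eq_sum, pvSum_eq_S, pvTotal_inv]
  ring
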